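-- pv_equiv track=rewrite | github.com/alessandrofd/leetcode-python | 1751-maximum-number-of-events-that-can-be-attended-ii.py | maxValue_bottom_up_bin_search
-- ===== SOURCE A (Python) =====
-- from typing import List
-- from bisect import bisect_right
--
-- def maxValue_bottom_up_bin_search(events: List[List[int]], k: int) -> int:
--     n = len(events)
--     dp = [[0] * (k + 1) for _ in range(n + 1)]
--     events = sorted(events)
--     starts = [event[0] for event in events]
--
--     for i in range(n - 1, -1, -1):
--         next_event = bisect_right(starts, events[i][1])
--         for count in range(1, k + 1):
--             dp[i][count] = max(
--                 dp[i + 1][count], events[i][2] + dp[next_event][count - 1]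
--             )
--
--     return dp[0][k]
-- ===== SOURCE B (Python) =====
-- from typing import List
-- from bisect import bisect_right
--
-- def maxValue_bottom_up_bin_search(events: List[List[int]], k: int) -> int:
--     events = sorted(events)
--     n = len(events)
--     starts = [event[0] for event in events]
--     memo = {}
--
--     def dfs(i: int, count: int) -> int:
--         if i >= n or count <= 0:
--             return 0
--         if (i, count) in memo:
--             return memo[(i, count)]
--         best = max(
--             dfs(i + 1, count),
--             events[i][2] + dfs(bisect_right(starts, events[i][1]), count - 1),
--         )
--         memo[(i, count)] = best
--         return best
--
--     return dfs(0, k)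
-- ===== Notes on version B (the rewrite author's own statement) =====
-- stated objective: alternative
-- what changed: Replaced A's backward-filled (n+1)x(k+1) dp table with a top-down recursion dfs(i, count) memoized in a dict, computing only the (i, count) states actually reachable from (0, k); Pre_ additionally excludes (only for k >= 2) inputs containing a malformed event whose end lies before the start of an event sorted strictly before it — impossible for real intervals — where the two programs' equally accidental values can disagree.
-- outside the precondition, e.g. on maxValue_bottom_up_bin_search([[1, -2, 3], [0, 0, 1]], 2): A returns 4, B returns 6; on maxValue_bottom_up_bin_search([[3, -2, 1], [3, 0, -1], [0, 2, -3]], 2): A returns 1, B returns 2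
-- crash fix: A raises IndexError whenever k < 0 (the [0]*(k+1) dp rows are empty, so dp[0][k] fails); B's dfs hits its count <= 0 base case and returns 0. — e.g. on maxValue_bottom_up_bin_search([[1, 2, 3]], -1): A raises IndexError, B returns 0
import Mathlib
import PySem

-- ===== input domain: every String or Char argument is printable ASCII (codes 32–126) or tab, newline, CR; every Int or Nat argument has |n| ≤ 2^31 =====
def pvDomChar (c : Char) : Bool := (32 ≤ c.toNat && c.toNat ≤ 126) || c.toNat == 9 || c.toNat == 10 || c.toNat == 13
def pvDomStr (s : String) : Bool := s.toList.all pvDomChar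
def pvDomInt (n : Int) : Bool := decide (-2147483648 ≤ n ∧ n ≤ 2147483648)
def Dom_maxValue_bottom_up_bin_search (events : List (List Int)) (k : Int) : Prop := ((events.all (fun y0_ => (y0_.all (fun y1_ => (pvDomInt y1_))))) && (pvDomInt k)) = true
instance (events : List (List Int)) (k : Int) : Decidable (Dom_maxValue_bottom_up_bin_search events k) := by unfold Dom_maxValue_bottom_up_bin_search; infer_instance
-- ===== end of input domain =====

-- B replaces A's backward-filled 2D dp table by a top-down memoized recursion over
-- (event index, remaining count); same sort and bisect_right transition.

-- ===== PORT A =====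
def maxValue_bottom_up_bin_search (events : List (List Int)) (k : Int) : Int :=
  let n : Int := PySem.List.len events
  let dp : List (List Int) := List.replicate (n + 1).toNat (List.replicate (k + 1).toNat 0)
  let evs : List (List Int) := PySem.List.sorted events (fun e => e)
  let starts : List Int := evs.map (fun event => PySem.List.pyGetD event 0 0)
  let dp : List (List Int) :=
    (PySem.List.pyRange (n - 1) (-1) (-1)).foldl (fun dp i =>
      let next : Nat := PySem.List.bisectRight starts (PySem.List.pyGetD (PySem.List.pyGetD evs i []) 1 0)
      (PySem.List.pyRange 1 (k + 1) 1).foldl (fun dp count =>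
        PySem.List.pySetD dp i (PySem.List.pySetD (PySem.List.pyGetD dp i []) count
          (max (PySem.List.pyGetD (PySem.List.pyGetD dp (i + 1) []) count 0)
               (PySem.List.pyGetD (PySem.List.pyGetD evs i []) 2 0 +
                PySem.List.pyGetD (PySem.List.pyGetD dp (next : Int) []) (count - 1) 0)))) dp) dp
  PySem.List.pyGetD (PySem.List.pyGetD dp 0 []) k 0

-- ===== PORT B =====
-- dfs(i, count) of Source B, with the memo dict threaded through (Lean is pure)
def pvDfsB (evs : List (List Int)) (starts : List Int)
    (memo : PySem.Dict (Int × Int) Int) (i : Nat) (c : Int) :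
    Int × PySem.Dict (Int × Int) Int :=
  if _h : evs.length ≤ i ∨ c ≤ 0 then (0, memo)
  else
    match memo.get? ((i : Int), c) with
    | some v => (v, memo)
    | none =>
      let (skipv, memo) := pvDfsB evs starts memo (i + 1) c
      let (takev, memo) := pvDfsB evs starts memo
        (PySem.List.bisectRight starts (PySem.List.pyGetD (PySem.List.pyGetD evs (i : Int) []) 1 0)) (c - 1)
      let best := max skipv (PySem.List.pyGetD (PySem.List.pyGetD evs (i : Int) []) 2 0 + takev)
      (best, memo.insert ((i : Int), c) best)
termination_by (c.toNat, evs.length - i)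
decreasing_by
  · apply Prod.Lex.right; omega
  · apply Prod.Lex.left; omega

def maxValue_bottom_up_bin_search_alt (events : List (List Int)) (k : Int) : Int :=
  let evs : List (List Int) := PySem.List.sorted events (fun e => e)
  let starts : List Int := evs.map (fun event => PySem.List.pyGetD event 0 0)
  (pvDfsB evs starts PySem.Dict.empty 0 k).1

-- ===== PRECONDITION & SPEC =====
-- Pre_ keeps exactly the inputs on which A returns (k ≥ 0 and the field accesses in bounds) and,
-- only when k ≥ 2, additionally excludes inputs containing a malformed event whose end lies before
-- the start of an event sorted strictly before it (the count condition below; impossible for real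
-- intervals, where end ≥ own start ≥ every earlier start): such inputs are not interval lists, no
-- behaviour is specified on them, and the two programs' equally accidental values there can disagree.
def Pre_maxValue_bottom_up_bin_search (events : List (List Int)) (k : Int) : Prop :=
  0 ≤ k ∧ (∀ e ∈ events, 2 ≤ e.length) ∧ (1 ≤ k → ∀ e ∈ events, 3 ≤ e.length) ∧
    (2 ≤ k → ∀ e ∈ events,
      events.countP (fun f => !decide (e < f)) ≤
      events.countP (fun f => decide (PySem.List.pyGetD f 0 0 ≤ PySem.List.pyGetD e 1 0)) + 1)
instance (events : List (List Int)) (k : Int) : Decidable (Pre_maxValue_bottom_up_bin_search events k) := by unfold Pre_maxValue_bottom_up_bin_search; infer_instance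

def pvWitness_maxValue_bottom_up_bin_search : List (List Int) × Int := ([[1, 2, 4], [2, 3, 7], [3, 9, 2]], 2)

def Spec_maxValue_bottom_up_bin_search (events : List (List Int)) (k : Int) (out : Int) : Prop := out = maxValue_bottom_up_bin_search_alt events k
instance (events : List (List Int)) (k : Int) (out : Int) : Decidable (Spec_maxValue_bottom_up_bin_search events k out) := by unfold Spec_maxValue_bottom_up_bin_search; infer_instance

-- A raises IndexError whenever k < 0 (the [0]*(k+1) dp rows are empty, so dp[0][k] fails) and
-- whenever k = 0 with a one-field event (its bisect probe reads event[1]); B never reads dp rows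
-- or event[1] in those cases — its dfs(0, k) hits the count <= 0 base case (or never takes a
-- one-field event when k = 0) — and it returns 0 as long as every event has a start field.
def Raises_maxValue_bottom_up_bin_search (events : List (List Int)) (k : Int) : Prop :=
  (∀ e ∈ events, 1 ≤ e.length) ∧ (k < 0 ∨ (k = 0 ∧ ∃ e ∈ events, e.length = 1))
instance (events : List (List Int)) (k : Int) : Decidable (Raises_maxValue_bottom_up_bin_search events k) := by unfold Raises_maxValue_bottom_up_bin_search; infer_instance
def pvRaiseWitness_maxValue_bottom_up_bin_search : List (List Int) × Int := ([[1, 2, 3]], -1)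
def pvRaiseWitnessOut_maxValue_bottom_up_bin_search : Int := 0

-- ===== CLAIM (what is proved, stated in full; the proofs are below) =====
def Claim_equal_maxValue_bottom_up_bin_search : Prop := ∀ (events : List (List Int)) (k : Int), Dom_maxValue_bottom_up_bin_search events k → Pre_maxValue_bottom_up_bin_search events k → Spec_maxValue_bottom_up_bin_search events k (maxValue_bottom_up_bin_search events k)

def Claim_raises_maxValue_bottom_up_bin_search : Prop := (∀ (events : List (List Int)) (k : Int), Dom_maxValue_bottom_up_bin_search events k → Raises_maxValue_bottom_up_bin_search events k → ¬ Pre_maxValue_bottom_up_bin_search events k) ∧ (Dom_maxValue_bottom_up_bin_search (pvRaiseWitness_maxValue_bottom_up_bin_search.1) (pvRaiseWitness_maxValue_bottom_up_bin_search.2) ∧ Raises_maxValue_bottom_up_bin_search (pvRaiseWitness_maxValue_bottom_up_bin_search.1) (pvRaiseWitness_maxValue_bottom_up_bin_search.2) ∧ maxValue_bottom_up_bin_search_alt (pvRaiseWitness_maxValue_bottom_up_bin_search.1) (pvRaiseWitness_maxValue_bottom_up_bin_search.2) = pvRaiseWitnessOut_maxValue_bottom_up_bin_search)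

-- ===== LEMMAS AND PROOFS =====

-- the recurrence A's table realises: dp[i][c] = pvG i c.  A jump j = bisect_right(starts, end_i)
-- with j < i lands on a row the backward fill has not touched yet, so it contributes 0.
def pvG (evs : List (List Int)) (starts : List Int) (i c : Nat) : Int :=
  if _h : i < evs.length ∧ 0 < c then
    max (pvG evs starts (i + 1) c)
        (PySem.List.pyGetD (PySem.List.pyGetD evs (i : Int) []) 2 0 +
         if i ≤ PySem.List.bisectRight starts (PySem.List.pyGetD (PySem.List.pyGetD evs (i : Int) []) 1 0) then
           pvG evs starts
             (PySem.List.bisectRight starts (PySem.List.pyGetD (PySem.List.pyGetD evs (i : Int) []) 1 0))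
             (c - 1)
         else 0)
  else 0
termination_by (c, evs.length - i)
decreasing_by
  · apply Prod.Lex.right; omega
  · apply Prod.Lex.left; omega

theorem pvG_zero (evs : List (List Int)) (starts : List Int) (i c : Nat)
    (h : evs.length ≤ i ∨ c = 0) : pvG evs starts i c = 0 := by
  rw [pvG]; rw [dif_neg]; omega

theorem pvG_pos (evs : List (List Int)) (starts : List Int) (i c : Nat)
    (hi : i < evs.length) (hc : 0 < c) :
    pvG evs starts i c =
      max (pvG evs starts (i + 1) c)
        (PySem.List.pyGetD (PySem.List.pyGetD evs (i : Int) []) 2 0 +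
         if i ≤ PySem.List.bisectRight starts (PySem.List.pyGetD (PySem.List.pyGetD evs (i : Int) []) 1 0) then
           pvG evs starts
             (PySem.List.bisectRight starts (PySem.List.pyGetD (PySem.List.pyGetD evs (i : Int) []) 1 0))
             (c - 1)
         else 0) := by
  rw [pvG]; rw [dif_pos ⟨hi, hc⟩]

-- bisect_right never returns a position beyond the end of the list
theorem pvBisectLoop_le (xs : List Int) (x : Int) :
    ∀ (fuel lo hi : Nat), lo ≤ hi → PySem.List.bisectRightLoop xs x fuel lo hi ≤ hi := by
  intro fuel
  induction fuel with
  | zero => intro lo hi h; exact h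
  | succ fuel ih =>
    intro lo hi h
    rw [PySem.List.bisectRightLoop]
    by_cases hlh : lo < hi
    · rw [if_pos hlh]
      cases hget : xs[(lo + hi) / 2]? with
      | some y =>
        show (if x < y then PySem.List.bisectRightLoop xs x fuel lo ((lo + hi) / 2)
              else PySem.List.bisectRightLoop xs x fuel ((lo + hi) / 2 + 1) hi) ≤ hi
        by_cases hxy : x < y
        · rw [if_pos hxy]
          exact le_trans (ih lo ((lo + hi) / 2) (by omega)) (by omega)
        · rw [if_neg hxy]
          exact ih ((lo + hi) / 2 + 1) hi (by omega)
      | none => exact h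
    · rw [if_neg hlh]
      exact h

theorem pvBisect_le (xs : List Int) (x : Int) : PySem.List.bisectRight xs x ≤ xs.length :=
  pvBisectLoop_le xs x xs.length 0 xs.length (by omega)

-- ---------- B side: the memoized dfs computes the clamp-free recurrence pvH ----------

def pvH (evs : List (List Int)) (starts : List Int) (i : Nat) (c : Int) : Int :=
  if _h : i < evs.length ∧ 0 < c then
    max (pvH evs starts (i + 1) c)
        (PySem.List.pyGetD (PySem.List.pyGetD evs (i : Int) []) 2 0 +
         pvH evs starts
           (PySem.List.bisectRight starts (PySem.List.pyGetD (PySem.List.pyGetD evs (i : Int) []) 1 0))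
           (c - 1))
  else 0
termination_by (c.toNat, evs.length - i)
decreasing_by
  · apply Prod.Lex.right; omega
  · apply Prod.Lex.left; omega

theorem pvH_zero (evs : List (List Int)) (starts : List Int) (i : Nat) (c : Int)
    (h : evs.length ≤ i ∨ c ≤ 0) : pvH evs starts i c = 0 := by
  rw [pvH]; rw [dif_neg]; omega

-- every value stored in the memo is the corresponding pvH value
def pvInvB (evs : List (List Int)) (starts : List Int) (memo : PySem.Dict (Int × Int) Int) : Prop :=
  ∀ (i : Nat) (c v : Int), memo.get? ((i : Int), c) = some v → v = pvH evs starts i c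

theorem pvDfsB_eq (evs : List (List Int)) (starts : List Int) :
    ∀ (memo : PySem.Dict (Int × Int) Int) (i : Nat) (c : Int), pvInvB evs starts memo →
      (pvDfsB evs starts memo i c).1 = pvH evs starts i c ∧
      pvInvB evs starts (pvDfsB evs starts memo i c).2 := by
  intro memo i c
  induction memo, i, c using pvDfsB.induct evs starts with
  | case1 memo i c hbase =>
    intro hinv
    rw [pvDfsB, dif_pos hbase, pvH_zero evs starts i c (by omega)]
    exact ⟨rfl, hinv⟩
  | case2 memo i c hbase v hget =>
    intro hinv
    rw [pvDfsB, dif_neg hbase, hget]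
    exact ⟨(hinv i c v hget).symm ▸ rfl, hinv⟩
  | case3 memo i c hbase hget skipv memo1 hskip takev memo2 htake ih1 ih2 =>
    intro hinv
    obtain ⟨hv1, hinv1⟩ := ih1 hinv
    rw [hskip] at hv1 hinv1
    simp only at hv1 hinv1
    obtain ⟨hv2, hinv2⟩ := ih2 hinv1
    rw [htake] at hv2 hinv2
    simp only at hv2 hinv2
    rw [pvDfsB, dif_neg hbase, hget]
    simp only [hskip, htake]
    have hbest : max (pvH evs starts (i + 1) c)
        (PySem.List.pyGetD (PySem.List.pyGetD evs (i : Int) []) 2 0 +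
          pvH evs starts
            (PySem.List.bisectRight starts (PySem.List.pyGetD (PySem.List.pyGetD evs (i : Int) []) 1 0))
            (c - 1)) = pvH evs starts i c := by
      conv_rhs => rw [pvH]
      rw [dif_pos (show i < evs.length ∧ 0 < c by omega)]
    constructor
    · show max skipv _ = _
      rw [hv1, hv2, hbest]
    · intro i' c' v' hget'
      rw [PySem.Dict.get?_insert] at hget'
      by_cases hk : ((i' : Int), c') = ((i : Int), c)
      · rw [if_pos hk] at hget'
        obtain ⟨hi', hc'⟩ := Prod.mk.injEq .. ▸ hk
        have hii : i' = i := by exact_mod_cast hi'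
        subst hii; subst hc'
        cases hget'
        show max skipv _ = _
        rw [hv1, hv2, hbest]
      · rw [if_neg hk] at hget'
        exact hinv2 i' c' v' hget'

theorem alt_eq_pvH (events : List (List Int)) (k : Int) :
    maxValue_bottom_up_bin_search_alt events k =
      pvH (PySem.List.sorted events (fun e => e))
        ((PySem.List.sorted events (fun e => e)).map (fun event => PySem.List.pyGetD event 0 0))
        0 k := by
  exact (pvDfsB_eq _ _ PySem.Dict.empty 0 k
    (fun i c v h => by rw [PySem.Dict.get?_empty] at h; cases h)).1

-- ---------- pvH = pvG on the admitted inputs ----------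

-- for c ≤ 1 the clamp can never matter: level 0 is identically 0
theorem pvH_eq_pvG_small (evs : List (List Int)) (starts : List Int) :
    ∀ (i : Nat) (c : Int), c ≤ 1 → pvH evs starts i c = pvG evs starts i c.toNat := by
  intro i
  induction hn : evs.length - i using Nat.strong_induction_on generalizing i with
  | _ n ih =>
    intro c hc
    by_cases hbase : i < evs.length ∧ 0 < c
    · have hct : c.toNat = 1 := by omega
      rw [pvH, dif_pos hbase, pvG, dif_pos (by omega)]
      rw [ih (evs.length - (i + 1)) (by omega) (i + 1) rfl c hc, hct]
      congr 1
      rw [pvH_zero evs starts _ (c - 1) (by omega)]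
      rw [show (1 : Nat) - 1 = 0 by rfl,
        pvG_zero evs starts _ 0 (Or.inr rfl)]
      split <;> simp
    · rw [pvH_zero evs starts i c (by omega), pvG_zero evs starts i c.toNat (by omega)]

-- when every jump moves forward the clamp in pvG is always taken
theorem pvH_eq_pvG_mono (evs : List (List Int)) (starts : List Int)
    (hmono : ∀ i : Nat, i < evs.length →
      i ≤ PySem.List.bisectRight starts (PySem.List.pyGetD (PySem.List.pyGetD evs (i : Int) []) 1 0)) :
    ∀ (c : Int) (i : Nat), pvH evs starts i c = pvG evs starts i c.toNat := by
  intro c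
  induction hm : c.toNat using Nat.strong_induction_on generalizing c with
  | _ m ihc =>
    intro i
    induction hn : evs.length - i using Nat.strong_induction_on generalizing i with
    | _ n ihi =>
      by_cases hbase : i < evs.length ∧ 0 < c
      · rw [pvH, dif_pos hbase, pvG, dif_pos (by omega)]
        subst hm
        rw [if_pos (hmono i hbase.1)]
        rw [ihi (evs.length - (i + 1)) (by omega) (i + 1) rfl]
        congr 2
        rw [ihc (c - 1).toNat (by omega) (c - 1) rfl]
        congr 1
        omega
      · rw [pvH_zero evs starts i c (by omega), pvG_zero evs starts i m (by omega)]

-- the count condition of Pre_ makes every jump move forward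
theorem pvMono_of_cnt (events : List (List Int))
    (hlen : ∀ e ∈ events, 3 ≤ e.length)
    (hcnt : ∀ e ∈ events,
      events.countP (fun f => !decide (e < f)) ≤
      events.countP (fun f => decide (PySem.List.pyGetD f 0 0 ≤ PySem.List.pyGetD e 1 0)) + 1) :
    ∀ i : Nat, i < (PySem.List.sorted events (fun e => e)).length →
      i ≤ PySem.List.bisectRight
            ((PySem.List.sorted events (fun e => e)).map (fun event => PySem.List.pyGetD event 0 0))
            (PySem.List.pyGetD (PySem.List.pyGetD (PySem.List.sorted events (fun e => e)) (i : Int) []) 1 0) := by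
  set evs := PySem.List.sorted events (fun e => e) with hevs
  set starts := evs.map (fun event => PySem.List.pyGetD event 0 0) with hstarts
  have hperm : evs.Perm events := PySem.List.sorted_perm events (fun e => e) false
  have hmem : ∀ e ∈ evs, e ∈ events := fun e he => hperm.mem_iff.mp he
  have hpw : List.Pairwise (fun a b : List Int => a ≤ b) evs := by
    rw [hevs]
    convert PySem.List.sorted_pairwise (κ := List Int) events (fun e => e) using 2
  -- starts is nondecreasing: evs is lexicographically sorted and every event is nonempty
  have hpws : List.Pairwise (fun a b : Int => a ≤ b) starts := by
    rw [hstarts]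
    rw [List.pairwise_map]
    refine hpw.imp_of_mem ?_
    intro a b ha hb hab
    have ha3 : 3 ≤ a.length := hlen a (hmem a ha)
    have hb3 : 3 ≤ b.length := hlen b (hmem b hb)
    rcases lt_or_eq_of_le hab with hlt | heq
    · cases a with
      | nil => simp at ha3
      | cons x xs =>
        cases b with
        | nil => simp at hb3
        | cons y ys =>
          rcases List.cons_lt_cons_iff.mp hlt with h1 | ⟨h1, _⟩
          · simpa [PySem.List.pyGetD, PySem.List.pyIdx?] using le_of_lt h1
          · simp [PySem.List.pyGetD, h1]
    · rw [heq]
  intro i hi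
  have hei : PySem.List.pyGetD evs (i : Int) [] = evs[i]'hi := by
    rw [PySem.List.pyGetD_natCast, List.getD_eq_getElem _ _ hi]
  rw [hei]
  set e := evs[i]'hi with hedef
  set x := PySem.List.pyGetD e 1 0 with hx
  have hsl : starts.length = evs.length := by rw [hstarts]; exact List.length_map ..
  by_contra hcon
  obtain ⟨hble, _, hhigh⟩ := PySem.List.bisectRight_spec starts x hpws
  set b := PySem.List.bisectRight starts x with hb
  -- the first i+1 entries of evs are all ≤ e
  have c1 : i + 1 ≤ evs.countP (fun f => !decide (e < f)) := by
    have hall : ∀ f ∈ evs.take (i + 1), (fun f => !decide (e < f)) f = true := by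
      intro f hf
      obtain ⟨j, hj, hgf⟩ := List.mem_iff_getElem.mp hf
      have hjlen : j < evs.length := by
        have := hj; rw [List.length_take] at this; omega
      have hfj : f = evs[j]'hjlen := by
        rw [← hgf, List.getElem_take]
      have hji : j ≤ i := by rw [List.length_take] at hj; omega
      have hle : f ≤ e := by
        rcases Nat.lt_or_ge j i with hlt | hge
        · rw [hfj, hedef]
          exact List.pairwise_iff_getElem.mp hpw j i hjlen hi hlt
        · have : j = i := by omega
          subst this
          rw [hfj, ← hedef]
      simpa using hle
    calc i + 1 = (evs.take (i + 1)).length := by rw [List.length_take]; omega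
      _ = (evs.take (i + 1)).countP (fun f => !decide (e < f)) :=
          (List.countP_eq_length.mpr hall).symm
      _ ≤ evs.countP (fun f => !decide (e < f)) := by
          conv_rhs => rw [← List.take_append_drop (i + 1) evs]
          rw [List.countP_append]
          omega
  -- at most b = bisect_right entries of starts are ≤ x
  have c3 : starts.countP (fun s => decide (s ≤ x)) ≤ b := by
    have hdrop : (starts.drop b).countP (fun s => decide (s ≤ x)) = 0 := by
      rw [List.countP_eq_zero]
      intro s hs
      obtain ⟨j, hj, hgs⟩ := List.mem_iff_getElem.mp hs
      have hjlen : b + j < starts.length := by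
        rw [List.length_drop] at hj; omega
      have hsj : s = starts[b + j]'hjlen := by rw [← hgs, List.getElem_drop]
      have := hhigh (b + j) hjlen (by omega)
      simp only [hsj, decide_eq_true_eq]
      omega
    calc starts.countP (fun s => decide (s ≤ x))
        = (starts.take b).countP (fun s => decide (s ≤ x)) +
          (starts.drop b).countP (fun s => decide (s ≤ x)) := by
          conv_lhs => rw [← List.take_append_drop b starts]
          rw [List.countP_append]
      _ ≤ (starts.take b).length + 0 := by
          rw [hdrop]; exact Nat.add_le_add (List.countP_le_length ..) le_rfl
      _ ≤ b := by rw [List.length_take]; omega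
  -- transport both counts to `events` and apply the Pre_ bound
  have he_events : e ∈ events := hmem e (List.getElem_mem hi)
  have hc := hcnt e he_events
  have t1 : events.countP (fun f => !decide (e < f)) = evs.countP (fun f => !decide (e < f)) :=
    (hperm.countP_eq _).symm
  have t2 : events.countP (fun f => decide (PySem.List.pyGetD f 0 0 ≤ PySem.List.pyGetD e 1 0)) =
      starts.countP (fun s => decide (s ≤ x)) := by
    rw [hstarts, List.countP_map, ← hperm.countP_eq]
    rfl
  rw [t1, t2] at hc
  omega

-- A = pvG : imported unchanged from the table analysis below
def pvRow (evs : List (List Int)) (starts : List Int) (kk j : Nat) : List Int :=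
  (List.range (kk + 1)).map (fun c => pvG evs starts j c)

def pvWrite (evs : List (List Int)) (i : Int) (next : Nat) (dp : List (List Int)) (count : Int) : List (List Int) :=
  PySem.List.pySetD dp i (PySem.List.pySetD (PySem.List.pyGetD dp i []) count
    (max (PySem.List.pyGetD (PySem.List.pyGetD dp (i + 1) []) count 0)
         (PySem.List.pyGetD (PySem.List.pyGetD evs i []) 2 0 +
          PySem.List.pyGetD (PySem.List.pyGetD dp (next : Int) []) (count - 1) 0)))

def pvStep (evs : List (List Int)) (starts : List Int) (k : Int) (dp : List (List Int)) (i : Int) : List (List Int) :=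
  (PySem.List.pyRange 1 (k + 1) 1).foldl
    (pvWrite evs i (PySem.List.bisectRight starts (PySem.List.pyGetD (PySem.List.pyGetD evs i []) 1 0))) dp

theorem pvRow_getD (evs : List (List Int)) (starts : List Int) (kk j c : Nat) (hc : c ≤ kk) :
    (pvRow evs starts kk j).getD c 0 = pvG evs starts j c := by
  unfold pvRow
  rw [List.getD_eq_getElem?_getD, List.getElem?_map, List.getElem?_range (by omega)]
  rfl

theorem pvRow_last (evs : List (List Int)) (starts : List Int) (kk : Nat) :
    pvRow evs starts kk evs.length = List.replicate (kk + 1) (0 : Int) := by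
  unfold pvRow
  rw [List.eq_replicate_iff]
  constructor
  · simp
  · intro b hb
    simp only [List.mem_map] at hb
    obtain ⟨c, _, hc⟩ := hb
    rw [← hc, pvG_zero evs starts _ _ (Or.inl le_rfl)]

theorem pvInner (evs : List (List Int)) (starts : List Int) (kk : Nat) (i : Nat) (nxt : Nat)
    (dp : List (List Int))
    (hnxdef : nxt = PySem.List.bisectRight starts (PySem.List.pyGetD (PySem.List.pyGetD evs (i : Int) []) 1 0))
    (hlen : dp.length = evs.length + 1)
    (hi : i < evs.length)
    (hnle : nxt ≤ evs.length)
    (hzlt : ∀ j : Nat, j < i → dp.getD j [] = List.replicate (kk + 1) (0 : Int))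
    (hzero : dp.getD i [] = List.replicate (kk + 1) (0 : Int))
    (hfin : ∀ j : Nat, i < j → j ≤ evs.length → dp.getD j [] = pvRow evs starts kk j) :
    ∀ c : Nat, c ≤ kk →
      ((PySem.List.pyRange 1 ((c : Int) + 1) 1).foldl (pvWrite evs (i : Int) nxt) dp).length = dp.length ∧
      (∀ j : Nat, j ≠ i →
        ((PySem.List.pyRange 1 ((c : Int) + 1) 1).foldl (pvWrite evs (i : Int) nxt) dp).getD j [] = dp.getD j []) ∧
      ((PySem.List.pyRange 1 ((c : Int) + 1) 1).foldl (pvWrite evs (i : Int) nxt) dp).getD i [] =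
        (List.range (c + 1)).map (fun t => pvG evs starts i t) ++ List.replicate (kk - c) 0 := by
  intro c
  induction c with
  | zero =>
    intro _
    rw [show ((0 : Nat) : Int) + 1 = 1 by norm_num, PySem.List.pyRange_one_eq_nil le_rfl]
    refine ⟨rfl, fun j _ => rfl, ?_⟩
    rw [List.foldl_nil, hzero]
    rw [List.range_one, List.map_cons, List.map_nil, pvG_zero evs starts i 0 (Or.inr rfl),
        Nat.sub_zero, List.replicate_succ]
    rfl
  | succ c ih =>
    intro hck
    have hc : c ≤ kk := by omega
    obtain ⟨ihlen, ihne, ihrow⟩ := ih hc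
    have hsplit : PySem.List.pyRange 1 ((↑(c + 1) : Int) + 1) 1 =
        PySem.List.pyRange 1 ((c : Int) + 1) 1 ++ [(c : Int) + 1] := by
      rw [show ((↑(c + 1) : Int) + 1) = ((c : Int) + 1) + 1 by omega]
      exact PySem.List.pyRange_one_succ_right (by omega)
    rw [hsplit, List.foldl_append, List.foldl_cons, List.foldl_nil]
    set dpc := (PySem.List.pyRange 1 ((c : Int) + 1) 1).foldl (pvWrite evs (i : Int) nxt) dp with hdpc
    unfold pvWrite
    have e1 : PySem.List.pyGetD dpc ((i : Int) + 1) [] = pvRow evs starts kk (i + 1) := by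
      rw [show ((i : Int) + 1) = ((i + 1 : Nat) : Int) by omega, PySem.List.pyGetD_natCast]
      rw [ihne (i + 1) (by omega), hfin (i + 1) (by omega) (by omega)]
    have e2 : PySem.List.pyGetD (pvRow evs starts kk (i + 1)) ((c : Int) + 1) 0 = pvG evs starts (i + 1) (c + 1) := by
      rw [show ((c : Int) + 1) = ((c + 1 : Nat) : Int) by omega, PySem.List.pyGetD_natCast]
      exact pvRow_getD evs starts kk (i + 1) (c + 1) hck
    -- the dp[next][count-1] read equals the clamped recurrence value
    have e34 : PySem.List.pyGetD (PySem.List.pyGetD dpc ((nxt : Nat) : Int) []) ((c : Int) + 1 - 1) 0 =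
        (if i ≤ nxt then pvG evs starts nxt c else 0) := by
      rw [show ((c : Int) + 1 - 1) = ((c : Nat) : Int) by omega]
      rcases lt_trichotomy nxt i with hlt | heq | hgt
      · rw [PySem.List.pyGetD_natCast, PySem.List.pyGetD_natCast,
            ihne nxt (by omega), hzlt nxt hlt, if_neg (by omega)]
        rw [List.getD_eq_getElem _ _ (by rw [List.length_replicate]; omega), List.getElem_replicate]
      · subst heq
        rw [PySem.List.pyGetD_natCast, PySem.List.pyGetD_natCast, ihrow, if_pos le_rfl]
        rw [List.getD_append _ _ _ _ (by simp)]
        rw [List.getD_eq_getElem?_getD, List.getElem?_map, List.getElem?_range (by omega)]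
        rfl
      · rw [PySem.List.pyGetD_natCast, PySem.List.pyGetD_natCast,
            ihne nxt (by omega), hfin nxt hgt hnle, if_pos (by omega)]
        exact pvRow_getD evs starts kk nxt c hc
    have e5 : PySem.List.pyGetD dpc (i : Int) [] =
        (List.range (c + 1)).map (fun t => pvG evs starts i t) ++ List.replicate (kk - c) 0 := by
      rw [PySem.List.pyGetD_natCast]; exact ihrow
    rw [e1, e2, e34, e5]
    have hv : max (pvG evs starts (i + 1) (c + 1))
        (PySem.List.pyGetD (PySem.List.pyGetD evs (i : Int) []) 2 0 +
          (if i ≤ nxt then pvG evs starts nxt c else 0)) =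
        pvG evs starts i (c + 1) := by
      rw [pvG_pos evs starts i (c + 1) hi (by omega)]
      rw [hnxdef]
      rfl
    have hrowlen : ((List.range (c + 1)).map (fun t => pvG evs starts i t)).length = c + 1 := by simp
    have hset : PySem.List.pySetD
        ((List.range (c + 1)).map (fun t => pvG evs starts i t) ++ List.replicate (kk - c) 0)
        ((c : Int) + 1) (pvG evs starts i (c + 1)) =
        (List.range (c + 1 + 1)).map (fun t => pvG evs starts i t) ++ List.replicate (kk - (c + 1)) 0 := by
      rw [show ((c : Int) + 1) = ((c + 1 : Nat) : Int) by omega, PySem.List.pySetD_natCast]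
      rw [List.set_append]
      rw [if_neg (by omega)]
      rw [hrowlen]
      rw [show c + 1 - (c + 1) = 0 by omega]
      rw [show kk - c = (kk - (c + 1)) + 1 by omega]
      rw [List.replicate_succ, List.set_cons_zero]
      simp [List.range_succ]
    rw [hv, hset]
    refine ⟨?_, ?_, ?_⟩
    · rw [PySem.List.pySetD_of_nonneg _ _ (by positivity), List.length_set]; exact ihlen
    · intro j hj
      rw [PySem.List.pySetD_of_nonneg _ _ (by positivity)]
      rw [List.getD_eq_getElem?_getD, List.getElem?_set_ne (by omega), ← List.getD_eq_getElem?_getD]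
      exact ihne j hj
    · rw [PySem.List.pySetD_of_nonneg _ _ (by positivity)]
      rw [List.getD_eq_getElem?_getD, Int.toNat_natCast,
          List.getElem?_set_self (by rw [ihlen, hlen]; omega)]
      rfl

def pvInvA (evs : List (List Int)) (starts : List Int) (kk : Nat) (i : Nat) (dp : List (List Int)) : Prop :=
  dp.length = evs.length + 1 ∧
  (∀ j : Nat, j < i → dp.getD j [] = List.replicate (kk + 1) (0 : Int)) ∧
  (∀ j : Nat, i ≤ j → j ≤ evs.length → dp.getD j [] = pvRow evs starts kk j)

theorem pvStep_inv (evs : List (List Int)) (starts : List Int) (kk : Nat) (i : Nat)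
    (dp : List (List Int)) (hi : i < evs.length)
    (hsl : starts.length = evs.length)
    (hinv : pvInvA evs starts kk (i + 1) dp) :
    pvInvA evs starts kk i (pvStep evs starts (kk : Int) dp (i : Int)) := by
  obtain ⟨hlen, hzero, hfin⟩ := hinv
  have hz : dp.getD i [] = List.replicate (kk + 1) (0 : Int) := hzero i (by omega)
  have hzl : ∀ j : Nat, j < i → dp.getD j [] = List.replicate (kk + 1) (0 : Int) :=
    fun j hj => hzero j (by omega)
  have hf : ∀ j : Nat, i < j → j ≤ evs.length → dp.getD j [] = pvRow evs starts kk j :=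
    fun j h1 h2 => hfin j (by omega) h2
  have hnle : PySem.List.bisectRight starts (PySem.List.pyGetD (PySem.List.pyGetD evs (i : Int) []) 1 0) ≤
      evs.length := by
    rw [← hsl]; exact pvBisect_le starts _
  obtain ⟨h1, h2, h3⟩ := pvInner evs starts kk i _ dp rfl hlen hi hnle hzl hz hf kk le_rfl
  unfold pvStep
  refine ⟨by rw [h1]; exact hlen, ?_, ?_⟩
  · intro j hj
    rw [h2 j (by omega)]
    exact hzero j (by omega)
  · intro j hij hjn
    by_cases hji : j = i
    · subst hji
      rw [h3]
      unfold pvRow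
      rw [Nat.sub_self, List.replicate_zero, List.append_nil]
    · rw [h2 j (by omega), hf j (by omega) hjn]

theorem pvOuter (evs : List (List Int)) (starts : List Int) (kk : Nat)
    (hsl : starts.length = evs.length) :
    ∀ i : Nat, i ≤ evs.length → ∀ dp : List (List Int), pvInvA evs starts kk i dp →
      pvInvA evs starts kk 0
        ((PySem.List.pyRange ((i : Int) - 1) (-1) (-1)).foldl (pvStep evs starts (kk : Int)) dp) := by
  intro i
  induction i with
  | zero =>
    intro _ dp hinv
    rw [PySem.List.pyRange_neg_one_eq_nil (by omega)]
    exact hinv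
  | succ i ih =>
    intro hle dp hinv
    have hcons : PySem.List.pyRange ((↑(i + 1) : Int) - 1) (-1) (-1) =
        (i : Int) :: PySem.List.pyRange ((i : Int) - 1) (-1) (-1) := by
      rw [show ((↑(i + 1) : Int) - 1) = (i : Int) by omega]
      exact PySem.List.pyRange_neg_one_cons (by omega)
    rw [hcons, List.foldl_cons]
    exact ih (by omega) _ (pvStep_inv evs starts kk i dp (by omega) hsl hinv)

theorem a_eq_pvG (events : List (List Int)) (k : Int) (hk : 0 ≤ k) :
    maxValue_bottom_up_bin_search events k =
      pvG (PySem.List.sorted events (fun e => e))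
        ((PySem.List.sorted events (fun e => e)).map (fun event => PySem.List.pyGetD event 0 0))
        0 k.toNat := by
  set evs := PySem.List.sorted events (fun e => e) with hevs
  set starts := evs.map (fun event => PySem.List.pyGetD event 0 0) with hstarts
  set kk := k.toNat with hkk
  have hkcast : k = (kk : Int) := by omega
  have hevlen : evs.length = events.length := PySem.List.length_sorted ..
  have hport : maxValue_bottom_up_bin_search events k =
      PySem.List.pyGetD (PySem.List.pyGetD
        ((PySem.List.pyRange (PySem.List.len events - 1) (-1) (-1)).foldl
          (pvStep evs starts k)
          (List.replicate (PySem.List.len events + 1).toNat (List.replicate (k + 1).toNat 0))) 0 []) k 0 := rfl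
  rw [hport]
  have hlen' : PySem.List.len events = (events.length : Int) := PySem.List.len_eq events
  rw [hlen', hkcast]
  have ht1 : ((events.length : Int) + 1).toNat = events.length + 1 := by omega
  have ht2 : ((kk : Int) + 1).toNat = kk + 1 := by omega
  rw [ht1, ht2]
  have hinv0 : pvInvA evs starts kk evs.length
      (List.replicate (events.length + 1) (List.replicate (kk + 1) (0 : Int))) := by
    refine ⟨by rw [List.length_replicate, hevlen], ?_, ?_⟩
    · intro j hj
      rw [List.getD_eq_getElem _ _ (by rw [List.length_replicate]; omega), List.getElem_replicate]
    · intro j h1 h2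
      have hje : j = evs.length := by omega
      subst hje
      rw [List.getD_eq_getElem _ _ (by rw [List.length_replicate]; omega), List.getElem_replicate,
          pvRow_last]
  have hsl : starts.length = evs.length := by rw [hstarts]; exact List.length_map ..
  have houter := pvOuter evs starts kk hsl evs.length le_rfl _ hinv0
  rw [← hevlen] at houter ⊢
  obtain ⟨hL, _, hRows⟩ := houter
  rw [PySem.List.pyGetD_zero]
  rw [hRows 0 le_rfl (by omega)]
  rw [PySem.List.pyGetD_natCast]
  exact pvRow_getD evs starts kk 0 kk le_rfl

-- ===== VERDICT (by name: the statement is the Claim_ definition above) =====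
theorem maxValue_bottom_up_bin_search_spec : Claim_equal_maxValue_bottom_up_bin_search := by
  intro events k _hd hp
  obtain ⟨hk, _h2, h3, hwf⟩ := hp
  unfold Spec_maxValue_bottom_up_bin_search
  rw [a_eq_pvG events k hk, alt_eq_pvH events k]
  by_cases hk2 : 2 ≤ k
  · exact (pvH_eq_pvG_mono _ _ (pvMono_of_cnt events (h3 (by omega)) (hwf hk2)) k 0).symm
  · exact (pvH_eq_pvG_small _ _ 0 k (by omega)).symm

@[simp]
theorem maxValue_bottom_up_bin_search_raises : Claim_raises_maxValue_bottom_up_bin_search := by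
  unfold Claim_raises_maxValue_bottom_up_bin_search
  constructor
  · rintro events k _hd ⟨h1, hk | ⟨hk0, e, he, hlen1⟩⟩ ⟨hk', h2, _⟩
    · omega
    · have := h2 e he
      omega
  · refine ⟨by decide, by decide, ?_⟩
    show (pvDfsB _ _ PySem.Dict.empty 0 (-1)).1 = 0
    rw [pvDfsB, dif_pos (by norm_num)]
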